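-- pv_equiv track=rewrite | github.com/KarlRombauts/contrast-one-templates | src/tools/analyze_variants.py | normalize_body
-- ===== SOURCE A (Python) =====
-- def normalize_body(body: str) -> str:
--     """Normalize a function body for comparison.
--
--     - Strip trailing whitespace from each line
--     - Collapse multiple blank lines to single blank lines
--     - Strip leading/trailing blank lines from the body
--     - Do NOT normalize indentation or case
--     """
--     lines = body.split('\n')
--     lines = [line.rstrip() for line in lines]
--     collapsed = []
--     prev_blank = False
--     for line in lines:
--         if line.strip() == '':
--             if not prev_blank:
--                 collapsed.append('')
--             prev_blank = True
--         else:
--             collapsed.append(line)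
--             prev_blank = False
--     while collapsed and collapsed[0].strip() == '':
--         collapsed.pop(0)
--     while collapsed and collapsed[-1].strip() == '':
--         collapsed.pop()
--     return '\n'.join(collapsed)
-- ===== SOURCE B (Python) =====
-- def normalize_body(body: str) -> str:
--     """Normalize a function body for comparison (paragraph-grouping form).
--
--     Collect maximal runs of nonempty rstripped lines as paragraphs and join
--     them with a single blank line; this collapses blank runs and trims
--     leading/trailing blank lines in one pass with no pop loops.
--     """
--     lines = [line.rstrip() for line in body.split('\n')]
--     paras = []
--     cur = []
--     for line in lines:
--         if line:
--             cur.append(line)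
--         elif cur:
--             paras.append('\n'.join(cur))
--             cur = []
--     if cur:
--         paras.append('\n'.join(cur))
--     return '\n\n'.join(paras)
-- ===== Notes on version B (the rewrite author's own statement) =====
-- stated objective: simpler
-- what changed: Replaces A's prev_blank state machine plus two while-pop trimming loops with a single pass that groups nonempty rstripped lines into paragraphs and joins them with blank lines, so collapsing and trimming fall out of the grouping.
import Mathlib
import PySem

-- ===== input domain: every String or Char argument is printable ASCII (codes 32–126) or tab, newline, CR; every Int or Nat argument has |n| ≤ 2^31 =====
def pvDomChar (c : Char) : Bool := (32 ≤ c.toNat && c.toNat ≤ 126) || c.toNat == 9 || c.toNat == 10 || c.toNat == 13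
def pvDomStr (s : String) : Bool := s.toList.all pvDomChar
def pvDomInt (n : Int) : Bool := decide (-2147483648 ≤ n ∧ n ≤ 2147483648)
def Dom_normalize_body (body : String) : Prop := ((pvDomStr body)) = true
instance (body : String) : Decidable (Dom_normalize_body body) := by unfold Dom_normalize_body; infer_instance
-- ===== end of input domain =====

-- B replaces A's prev_blank state machine and two pop loops by grouping nonempty
-- rstripped lines into paragraphs joined with a blank line (objective: simpler).

-- ===== PORT A =====
-- the loop body: prev_blank state machine appending to `collapsed`
def pvCollapseStep (st : List (List Char) × Bool) (line : List Char) : List (List Char) × Bool :=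
  if PySem.Chars.strip line = [] then
    (if st.2 then st.1 else st.1 ++ [[]], true)
  else
    (st.1 ++ [line], false)

-- while collapsed and collapsed[0].strip() == '': collapsed.pop(0)
def pvDropLead : List (List Char) → List (List Char)
  | [] => []
  | l :: ls => if PySem.Chars.strip l = [] then pvDropLead ls else l :: ls

-- while collapsed and collapsed[-1].strip() == '': collapsed.pop()
def pvDropTrail : List (List Char) → List (List Char)
  | [] => []
  | l :: ls =>
    match pvDropTrail ls with
    | [] => if PySem.Chars.strip l = [] then [] else [l]
    | r => l :: r

def normalize_body (body : String) : String :=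
  let lines := (PySem.Chars.splitOn body.toList ['\n']).map PySem.Chars.rstrip
  let collapsed := (lines.foldl pvCollapseStep ([], false)).1
  String.ofList (PySem.Chars.join ['\n'] (pvDropTrail (pvDropLead collapsed)))

-- ===== PORT B =====
-- the loop body: append to current paragraph, or flush it on a blank line
def pvParaStep (st : List (List Char) × List (List Char)) (line : List Char) :
    List (List Char) × List (List Char) :=
  if line ≠ [] then (st.1, st.2 ++ [line])
  else if st.2 ≠ [] then (st.1 ++ [PySem.Chars.join ['\n'] st.2], [])
  else st

def normalize_body_alt (body : String) : String :=
  let lines := (PySem.Chars.splitOn body.toList ['\n']).map PySem.Chars.rstrip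
  let st := lines.foldl pvParaStep ([], [])
  let paras := if st.2 ≠ [] then st.1 ++ [PySem.Chars.join ['\n'] st.2] else st.1
  String.ofList (PySem.Chars.join ['\n', '\n'] paras)

-- ===== PRECONDITION & SPEC =====
def Spec_normalize_body (body : String) (out : String) : Prop := out = normalize_body_alt body
instance (body : String) (out : String) : Decidable (Spec_normalize_body body out) := by unfold Spec_normalize_body; infer_instance

-- ===== CLAIM (what is proved, stated in full; the proofs are below) =====
def Claim_equal_normalize_body : Prop := ∀ (body : String), Dom_normalize_body body → Spec_normalize_body body (normalize_body body)

-- ===== LEMMAS AND PROOFS =====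

-- clean collapse: A's state machine with the blank test reduced to `l = []`
def pvColR : Bool → List (List Char) → List (List Char)
  | _, [] => []
  | pb, l :: ls =>
    if l = [] then (if pb then pvColR true ls else [] :: pvColR true ls)
    else l :: pvColR false ls

-- paragraph grouping: maximal runs of nonempty lines, `cur` = run being built
def pvGroups : List (List Char) → List (List Char) → List (List (List Char))
  | cur, [] => if cur = [] then [] else [cur]
  | cur, l :: ls =>
    if l = [] then (if cur = [] then pvGroups [] ls else cur :: pvGroups [] ls)
    else pvGroups (cur ++ [l]) ls

-- ---- blank-test lemmas ----
lemma pv_strip_nil : PySem.Chars.strip [] = [] := rfl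

lemma pv_rstrip_eq_nil_iff (cs : List Char) :
    PySem.Chars.rstrip cs = [] ↔ ∀ c ∈ cs, PySem.Chars.isspace c := by
  simp [PySem.Chars.rstrip, List.dropWhile_eq_nil_iff]

lemma pv_strip_eq_nil_imp (x : List Char) (h : PySem.Chars.strip x = []) :
    ∀ c ∈ x, PySem.Chars.isspace c = true := by
  intro c hc
  have h2 : ∀ c ∈ PySem.Chars.lstrip x, PySem.Chars.isspace c := by
    rw [PySem.Chars.strip] at h
    exact (pv_rstrip_eq_nil_iff _).1 h
  rcases List.mem_append.1 (by rw [List.takeWhile_append_dropWhile] at *; exact hc :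
      c ∈ x.takeWhile PySem.Chars.isspace ++ x.dropWhile PySem.Chars.isspace) with h3 | h3
  · exact List.mem_takeWhile_imp h3
  · exact h2 c h3

lemma pv_strip_rstrip_iff (cs : List Char) :
    PySem.Chars.strip (PySem.Chars.rstrip cs) = [] ↔ PySem.Chars.rstrip cs = [] := by
  constructor
  · intro h
    by_contra hne
    have hd : cs.reverse.dropWhile PySem.Chars.isspace ≠ [] := by
      intro h0; apply hne; simp [PySem.Chars.rstrip, h0]
    have hnp := List.head_dropWhile_not PySem.Chars.isspace hd
    have hmem : (cs.reverse.dropWhile PySem.Chars.isspace).head hd ∈ PySem.Chars.rstrip cs := by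
      simp only [PySem.Chars.rstrip, List.mem_reverse]
      exact List.head_mem hd
    rw [pv_strip_eq_nil_imp _ h _ hmem] at hnp; simp at hnp
  · intro h; rw [h]; rfl

-- ---- A's fold equals the clean collapse ----
lemma pv_foldA (ls : List (List Char)) :
    ∀ acc pb, (∀ l ∈ ls, (PySem.Chars.strip l = [] ↔ l = [])) →
      (List.foldl pvCollapseStep (acc, pb) ls).1 = acc ++ pvColR pb ls := by
  induction ls with
  | nil => intro acc pb _; simp [pvColR]
  | cons l ls ih =>
    intro acc pb h
    have hl := h l (by simp)
    have htail : ∀ x ∈ ls, (PySem.Chars.strip x = [] ↔ x = []) :=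
      fun x hx => h x (by simp [hx])
    by_cases hb : l = []
    · subst hb
      have hs : PySem.Chars.strip ([] : List Char) = [] := rfl
      cases pb <;>
        simp [List.foldl_cons, pvCollapseStep, hs, pvColR, ih _ _ htail, List.append_assoc]
    · have hs : PySem.Chars.strip l ≠ [] := fun hc => hb (hl.1 hc)
      simp [List.foldl_cons, pvCollapseStep, hs, pvColR, hb, ih _ _ htail, List.append_assoc]

-- ---- pvDropTrail facts ----
lemma pv_dt_append_blank (xs : List (List Char)) :
    pvDropTrail (xs ++ [[]]) = pvDropTrail xs := by
  induction xs with
  | nil => simp [pvDropTrail]; rfl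
  | cons x xs ih => simp only [List.cons_append, pvDropTrail, ih]

lemma pv_dt_of_last (xs : List (List Char)) (l : List Char)
    (hl : xs.getLast? = some l) (h : PySem.Chars.strip l ≠ []) :
    pvDropTrail xs = xs := by
  induction xs with
  | nil => simp at hl
  | cons x xs ih =>
    cases xs with
    | nil =>
      simp at hl
      subst hl
      simp [pvDropTrail, h]
    | cons y ys =>
      rw [List.getLast?_cons_cons] at hl
      have := ih hl
      rw [pvDropTrail, this]

-- ---- intercalate helpers ----
lemma pv_ic_cons {α : Type} (sep x y : List α) (zs : List (List α)) :
    List.intercalate sep (x :: y :: zs) = x ++ sep ++ List.intercalate sep (y :: zs) := by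
  simp [List.intercalate, List.intersperse, List.append_assoc]

lemma pv_ic_append {α : Type} (sep : List α) (xs ys : List (List α))
    (hx : xs ≠ []) (hy : ys ≠ []) :
    List.intercalate sep (xs ++ ys) = List.intercalate sep xs ++ sep ++ List.intercalate sep ys := by
  induction xs with
  | nil => exact absurd rfl hx
  | cons x xs ih =>
    cases xs with
    | nil =>
      cases ys with
      | nil => exact absurd rfl hy
      | cons y ys => simp [List.intercalate, List.intersperse, List.append_assoc]
    | cons x2 t =>
      rw [List.cons_append, List.cons_append, pv_ic_cons, pv_ic_cons,
        ← List.cons_append, ih (by simp)]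
      simp [List.append_assoc]

lemma pv_ic_ne_nil (gs : List (List (List Char))) (hg : gs ≠ []) (hne : ∀ g ∈ gs, g ≠ []) :
    List.intercalate [([] : List Char)] gs ≠ [] := by
  cases gs with
  | nil => exact absurd rfl hg
  | cons g t =>
    have hgne : g ≠ [] := hne g (by simp)
    cases t with
    | nil => simpa [List.intercalate] using hgne
    | cons y ys => rw [pv_ic_cons]; simp [hgne]

-- ---- pvGroups facts ----
lemma pv_groups_ne (ls : List (List Char)) :
    ∀ cur, cur ≠ [] → pvGroups cur ls ≠ [] := by
  induction ls with
  | nil => intro cur h; simp [pvGroups, h]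
  | cons l ls ih =>
    intro cur h
    by_cases hb : l = []
    · subst hb; simp [pvGroups, h]
    · simp only [pvGroups, if_neg hb]
      exact ih (cur ++ [l]) (by simp)

lemma pv_groups_mem (ls : List (List Char)) :
    (∀ cur, cur ≠ [] → ∀ g ∈ pvGroups cur ls, g ≠ []) ∧ (∀ g ∈ pvGroups [] ls, g ≠ []) := by
  induction ls with
  | nil =>
    constructor
    · intro cur h g hg; simp [pvGroups, h] at hg; subst hg; exact h
    · intro g hg; simp [pvGroups] at hg
  | cons l ls ih =>
    by_cases hb : l = []
    · subst hb
      constructor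
      · intro cur h g hg
        simp [pvGroups, h] at hg
        rcases hg with hg | hg
        · subst hg; exact h
        · exact ih.2 g hg
      · intro g hg
        simp [pvGroups] at hg
        exact ih.2 g hg
    · constructor
      · intro cur h g hg
        simp only [pvGroups, if_neg hb] at hg
        exact ih.1 (cur ++ [l]) (by simp) g hg
      · intro g hg
        simp only [pvGroups, if_neg hb] at hg
        exact ih.1 ([] ++ [l]) (by simp) g hg

-- ---- the core: trimmed collapse = intercalated groups ----
lemma pv_getLast_append {gl : List Char} (p : List (List Char)) {gL : List (List Char)}
    (h : gL.getLast? = some gl) : (p ++ gL).getLast? = some gl := by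
  rw [List.getLast?_append]; simp [h]

lemma pv_MN (ls : List (List Char)) :
    (∀ l ∈ ls, (PySem.Chars.strip l = [] ↔ l = [])) →
    (∀ p g gl, g.getLast? = some gl → PySem.Chars.strip gl ≠ [] →
       pvDropTrail (p ++ g ++ pvColR false ls) = p ++ List.intercalate [[]] (pvGroups g ls)) ∧
    (∀ p g gl, g.getLast? = some gl → PySem.Chars.strip gl ≠ [] →
       pvDropTrail (p ++ g ++ [[]] ++ pvColR true ls)
         = p ++ List.intercalate [[]] (g :: pvGroups [] ls)) := by
  induction ls with
  | nil =>
    intro _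
    constructor
    · intro p g gl hgl hs
      have hg : g ≠ [] := by rintro rfl; simp at hgl
      rw [show pvColR false [] = [] from rfl, List.append_nil,
        pv_dt_of_last (p ++ g) gl (pv_getLast_append p hgl) hs]
      simp [pvGroups, hg, List.intercalate]
    · intro p g gl hgl hs
      rw [show pvColR true [] = [] from rfl, List.append_nil, pv_dt_append_blank,
        pv_dt_of_last (p ++ g) gl (pv_getLast_append p hgl) hs]
      simp [pvGroups, List.intercalate]
  | cons l ls ih =>
    intro hls
    have htail : ∀ x ∈ ls, (PySem.Chars.strip x = [] ↔ x = []) :=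
      fun x hx => hls x (List.mem_cons_of_mem _ hx)
    obtain ⟨ihM, ihN⟩ := ih htail
    have hl := hls l (by simp)
    by_cases hb : l = []
    · subst hb
      constructor
      · intro p g gl hgl hs
        have hg : g ≠ [] := by rintro rfl; simp at hgl
        have hN := ihN p g gl hgl hs
        rw [show pvColR false ([] :: ls) = [] :: pvColR true ls from by simp [pvColR],
          show pvGroups g ([] :: ls) = g :: pvGroups [] ls from by simp [pvGroups, hg]]
        calc pvDropTrail (p ++ g ++ ([] :: pvColR true ls))
            = pvDropTrail (p ++ g ++ [[]] ++ pvColR true ls) := by simp [List.append_assoc]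
          _ = _ := hN
      · intro p g gl hgl hs
        have hN := ihN p g gl hgl hs
        rw [show pvColR true ([] :: ls) = pvColR true ls from by simp [pvColR],
          show pvGroups [] ([] :: ls) = pvGroups [] ls from by simp [pvGroups]]
        exact hN
    · have hsl : PySem.Chars.strip l ≠ [] := fun hc => hb (hl.1 hc)
      constructor
      · intro p g gl hgl hs
        have hM := ihM p (g ++ [l]) l (by simp) hsl
        rw [show pvColR false (l :: ls) = l :: pvColR false ls from by simp [pvColR, hb],
          show pvGroups g (l :: ls) = pvGroups (g ++ [l]) ls from by simp [pvGroups, hb]]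
        calc pvDropTrail (p ++ g ++ (l :: pvColR false ls))
            = pvDropTrail (p ++ (g ++ [l]) ++ pvColR false ls) := by simp [List.append_assoc]
          _ = _ := hM
      · intro p g gl hgl hs
        have hM := ihM (p ++ g ++ [[]]) [l] l (by simp) hsl
        rw [show pvColR true (l :: ls) = l :: pvColR false ls from by simp [pvColR, hb],
          show pvGroups [] (l :: ls) = pvGroups [l] ls from by simp [pvGroups, hb]]
        obtain ⟨G1, Gs, hG⟩ : ∃ a t, pvGroups [l] ls = a :: t := by
          cases hGG : pvGroups [l] ls with
          | nil => exact absurd hGG (pv_groups_ne ls [l] (by simp))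
          | cons a t => exact ⟨a, t, rfl⟩
        calc pvDropTrail (p ++ g ++ [[]] ++ (l :: pvColR false ls))
            = pvDropTrail ((p ++ g ++ [[]]) ++ [l] ++ pvColR false ls) := by
              simp [List.append_assoc]
          _ = (p ++ g ++ [[]]) ++ List.intercalate [[]] (pvGroups [l] ls) := hM
          _ = p ++ List.intercalate [[]] (g :: pvGroups [l] ls) := by
              rw [hG, pv_ic_cons]; simp [List.append_assoc]

lemma pv_L (ls : List (List Char)) :
    (∀ l ∈ ls, (PySem.Chars.strip l = [] ↔ l = [])) →
    ∀ pb, pvDropTrail (pvDropLead (pvColR pb ls)) = List.intercalate [[]] (pvGroups [] ls) := by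
  induction ls with
  | nil => intro _ pb; simp [pvColR, pvDropLead, pvDropTrail, pvGroups, List.intercalate]
  | cons l ls ih =>
    intro hls pb
    have htail : ∀ x ∈ ls, (PySem.Chars.strip x = [] ↔ x = []) :=
      fun x hx => hls x (List.mem_cons_of_mem _ hx)
    have hl := hls l (by simp)
    by_cases hb : l = []
    · subst hb
      have hdl : pvDropLead (pvColR pb ([] :: ls)) = pvDropLead (pvColR true ls) := by
        cases pb <;> simp [pvColR, pvDropLead, pv_strip_nil]
      rw [hdl, show pvGroups [] ([] :: ls) = pvGroups [] ls from by simp [pvGroups]]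
      exact ih htail true
    · have hsl : PySem.Chars.strip l ≠ [] := fun hc => hb (hl.1 hc)
      rw [show pvColR pb (l :: ls) = l :: pvColR false ls from by cases pb <;> simp [pvColR, hb],
        show pvDropLead (l :: pvColR false ls) = l :: pvColR false ls from by
          simp [pvDropLead, hsl],
        show pvGroups [] (l :: ls) = pvGroups [l] ls from by simp [pvGroups, hb]]
      have hM := (pv_MN ls htail).1 [] [l] l (by simp) hsl
      simpa using hM

-- ---- B's fold equals groups ----
lemma pv_foldB (ls : List (List Char)) :
    ∀ paras cur,
      (if (List.foldl pvParaStep (paras, cur) ls).2 ≠ []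
       then (List.foldl pvParaStep (paras, cur) ls).1
            ++ [PySem.Chars.join ['\n'] (List.foldl pvParaStep (paras, cur) ls).2]
       else (List.foldl pvParaStep (paras, cur) ls).1)
      = paras ++ (pvGroups cur ls).map (PySem.Chars.join ['\n']) := by
  induction ls with
  | nil =>
    intro paras cur
    by_cases h : cur = []
    · subst h; simp [pvGroups]
    · simp [pvGroups, h]
  | cons l ls ih =>
    intro paras cur
    by_cases hb : l = []
    · subst hb
      by_cases hc : cur = []
      · subst hc
        rw [List.foldl_cons, show pvParaStep (paras, []) [] = (paras, []) from by simp [pvParaStep],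
          show pvGroups [] ([] :: ls) = pvGroups [] ls from by simp [pvGroups]]
        exact ih paras []
      · rw [List.foldl_cons,
          show pvParaStep (paras, cur) []
              = (paras ++ [PySem.Chars.join ['\n'] cur], []) from by simp [pvParaStep, hc],
          show pvGroups cur ([] :: ls) = cur :: pvGroups [] ls from by simp [pvGroups, hc],
          ih (paras ++ [PySem.Chars.join ['\n'] cur]) []]
        simp [List.append_assoc]
    · rw [List.foldl_cons,
        show pvParaStep (paras, cur) l = (paras, cur ++ [l]) from by simp [pvParaStep, hb],
        show pvGroups cur (l :: ls) = pvGroups (cur ++ [l]) ls from by simp [pvGroups, hb]]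
      exact ih paras (cur ++ [l])

-- ---- joining: single-newline join of intercalated groups = blank-line join ----
lemma pv_joinJ (gs : List (List (List Char))) (hne : ∀ g ∈ gs, g ≠ []) :
    PySem.Chars.join ['\n'] (List.intercalate [[]] gs)
      = PySem.Chars.join ['\n', '\n'] (gs.map (PySem.Chars.join ['\n'])) := by
  induction gs with
  | nil => simp [PySem.Chars.join, List.intercalate]
  | cons g gs ih =>
    have hgne : g ≠ [] := hne g (by simp)
    have htail : ∀ x ∈ gs, x ≠ [] := fun x hx => hne x (List.mem_cons_of_mem _ hx)
    cases gs with
    | nil => simp [PySem.Chars.join, List.intercalate, List.intersperse]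
    | cons g2 t =>
      obtain ⟨a, b, hab⟩ : ∃ a b, List.intercalate [([] : List Char)] (g2 :: t) = a :: b := by
        cases hGG : List.intercalate [([] : List Char)] (g2 :: t) with
        | nil => exact absurd hGG (pv_ic_ne_nil (g2 :: t) (by simp) htail)
        | cons a b => exact ⟨a, b, rfl⟩
      have hR : List.intercalate ['\n', '\n'] ((g :: g2 :: t).map (PySem.Chars.join ['\n']))
          = List.intercalate ['\n'] g ++ ['\n', '\n']
            ++ List.intercalate ['\n', '\n'] ((g2 :: t).map (PySem.Chars.join ['\n'])) := by
        simp only [List.map_cons]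
        rw [pv_ic_cons]
        simp only [PySem.Chars.join]
      have ih' := ih htail
      simp only [PySem.Chars.join] at ih' ⊢
      rw [hR, ← ih']
      calc List.intercalate ['\n'] (List.intercalate [[]] (g :: g2 :: t))
          = List.intercalate ['\n'] (g ++ ([] :: a :: b)) := by
            rw [pv_ic_cons, hab]; simp [List.append_assoc]
        _ = List.intercalate ['\n'] g ++ ['\n'] ++ List.intercalate ['\n'] ([] :: a :: b) :=
            pv_ic_append _ _ _ hgne (by simp)
        _ = List.intercalate ['\n'] g ++ ['\n', '\n'] ++ List.intercalate ['\n'] (a :: b) := by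
            rw [pv_ic_cons]; simp [List.append_assoc]
        _ = List.intercalate ['\n'] g ++ ['\n', '\n']
            ++ List.intercalate ['\n'] (List.intercalate [[]] (g2 :: t)) := by rw [hab]

-- ===== VERDICT (by name: the statement is the Claim_ definition above) =====
theorem normalize_body_spec : Claim_equal_normalize_body := by
  unfold Claim_equal_normalize_body Spec_normalize_body
  intro body _
  simp only [normalize_body, normalize_body_alt]
  have hls : ∀ l ∈ (PySem.Chars.splitOn body.toList ['\n']).map PySem.Chars.rstrip,
      (PySem.Chars.strip l = [] ↔ l = []) := by
    intro l hl
    obtain ⟨cs, _, rfl⟩ := List.mem_map.1 hl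
    exact ⟨fun h => (pv_strip_rstrip_iff cs).1 h, fun h => by rw [h]; rfl⟩
  rw [pv_foldA _ [] false hls, List.nil_append, pv_L _ hls false,
    pv_joinJ _ (pv_groups_mem _).2, pv_foldB _ [] [], List.nil_append]
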